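-- pv_equiv track=rewrite | github.com/Ezozbek2005/learn-python | lesson-6/homework/hw6.py | add_underscores
-- ===== SOURCE A (Python) =====
-- def add_underscores(txt):
--     vowels = "aeiou"
--     result = ""
--     count = 0  # 3 ta harf sanash
--
--     for i in range(len(txt)):
--         result += txt[i]
--         count += 1
--
--         if count == 3:
--             if txt[i] not in vowels and i != len(txt) - 1:
--                 result += "_"
--             count = 0
--
--     return result
-- ===== SOURCE B (Python) =====
-- def add_underscores(txt):
--     vowels = "aeiou"
--     parts = []
--     i = 0
--     n = len(txt)
--     while i + 3 < n:
--         chunk = txt[i:i+3]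
--         parts.append(chunk)
--         if chunk[2] not in vowels:
--             parts.append("_")
--         i += 3
--     parts.append(txt[i:])
--     return "".join(parts)
-- ===== Notes on version B (the rewrite author's own statement) =====
-- stated objective: alternative
-- what changed: Replaces the per-character loop with its modulo-3 counter and repeated string concatenation by a stride-3 chunking loop that collects slices in a list and joins once.
import Mathlib
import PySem

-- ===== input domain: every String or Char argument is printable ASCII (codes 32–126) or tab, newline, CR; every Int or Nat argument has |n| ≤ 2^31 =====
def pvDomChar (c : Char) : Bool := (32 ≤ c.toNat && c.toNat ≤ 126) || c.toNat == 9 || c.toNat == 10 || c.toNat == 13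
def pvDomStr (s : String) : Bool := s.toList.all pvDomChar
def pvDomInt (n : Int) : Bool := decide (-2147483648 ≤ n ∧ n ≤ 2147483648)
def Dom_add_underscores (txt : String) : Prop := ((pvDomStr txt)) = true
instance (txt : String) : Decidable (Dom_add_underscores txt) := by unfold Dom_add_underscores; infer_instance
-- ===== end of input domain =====

-- B replaces A's per-character counter loop (with string concatenation) by a stride-3 chunking
-- loop that emits whole slices and the separator per chunk; alternative decomposition.


-- ===== PORT A =====
-- one iteration of A's for-loop: state = (result, count); txt[i] is always in range,
-- so pyGetD with a dummy default is exact here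
def stepA (cs : List Char) (st : List Char × Int) (i : Int) : List Char × Int :=
  let c := PySem.List.pyGetD cs i ' '
  let result := st.1 ++ [c]
  let count := st.2 + 1
  if count = 3 then
    (if ¬ c ∈ "aeiou".toList ∧ i ≠ (cs.length : Int) - 1 then result ++ ['_'] else result, 0)
  else (result, count)

def add_underscores (txt : String) : String :=
  let cs := txt.toList
  String.mk ((PySem.List.pyRange 0 (cs.length : Int) 1).foldl (stepA cs) ([], 0)).1

-- ===== PORT B =====
-- the while-loop of Source B: parts is kept as the flat character list being built
-- (''.join of the appended pieces); txt[i:i+3] = (cs.drop i).take 3 for the Nat index i,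
-- chunk[2] is in range since i+3 < len, so getD with a dummy default is exact
def altGo (cs : List Char) (i : Nat) (parts : List Char) : List Char :=
  if h : i + 3 < cs.length then
    let chunk := (cs.drop i).take 3
    let parts := parts ++ chunk
    let parts := if chunk.getD 2 ' ' ∈ "aeiou".toList then parts else parts ++ ['_']
    altGo cs (i + 3) parts
  else
    parts ++ cs.drop i
termination_by cs.length - i

def add_underscores_alt (txt : String) : String :=
  String.mk (altGo txt.toList 0 [])

-- ===== PRECONDITION & SPEC =====
def Spec_add_underscores (txt : String) (out : String) : Prop := out = add_underscores_alt txt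
instance (txt : String) (out : String) : Decidable (Spec_add_underscores txt out) := by unfold Spec_add_underscores; infer_instance

-- ===== CLAIM (what is proved, stated in full; the proofs are below) =====
def Claim_equal_add_underscores : Prop := ∀ (txt : String), Dom_add_underscores txt → Spec_add_underscores txt (add_underscores txt)

-- ===== LEMMAS AND PROOFS =====

lemma stepA_c0 (cs : List Char) (acc : List Char) (i : Int) :
    stepA cs (acc, 0) i = (acc ++ [PySem.List.pyGetD cs i ' '], 1) := by
  simp [stepA]

lemma stepA_c1 (cs : List Char) (acc : List Char) (i : Int) :
    stepA cs (acc, 1) i = (acc ++ [PySem.List.pyGetD cs i ' '], 2) := by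
  simp [stepA]

lemma stepA_c2 (cs : List Char) (acc : List Char) (i : Int) :
    stepA cs (acc, 2) i =
      (if ¬ PySem.List.pyGetD cs i ' ' ∈ "aeiou".toList ∧ i ≠ (cs.length : Int) - 1
        then acc ++ [PySem.List.pyGetD cs i ' '] ++ ['_']
        else acc ++ [PySem.List.pyGetD cs i ' '], 0) := by
  simp [stepA]

lemma foldA_eq (cs : List Char) (k s : Nat) (hk : cs.length - s = k) (hs : s ≤ cs.length)
    (acc : List Char) :
    ((PySem.List.pyRange (s : Int) (cs.length : Int) 1).foldl (stepA cs) (acc, 0)).1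
      = altGo cs s acc := by
  induction k using Nat.strong_induction_on generalizing s acc with
  | _ k ih =>
  have hdropLen : (cs.drop s).length = cs.length - s := by simp
  have hget : ∀ m : Nat, PySem.List.pyGetD cs ((s : Int) + (m : Int)) ' '
      = (cs.drop s).getD m ' ' := by
    intro m
    have : ((s : Int) + (m : Int)) = ((s + m : Nat) : Int) := by push_cast; ring
    rw [this, PySem.List.pyGetD_natCast]
    simp [List.getD, List.getElem?_drop]
  by_cases h3 : s + 3 < cs.length
  · -- full chunk with characters remaining after it
    obtain ⟨a, b, c, rest, hd⟩ : ∃ a b c rest, cs.drop s = a :: b :: c :: rest := by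
      match hdd : cs.drop s with
      | [] => rw [hdd] at hdropLen; simp at hdropLen; omega
      | [a] => rw [hdd] at hdropLen; simp at hdropLen; omega
      | [a, b] => rw [hdd] at hdropLen; simp at hdropLen; omega
      | a :: b :: c :: rest => exact ⟨a, b, c, rest, rfl⟩
    have hga : PySem.List.pyGetD cs (s : Int) ' ' = a := by
      have := hget 0; simpa [hd] using this
    have hgb : PySem.List.pyGetD cs ((s : Int) + 1) ' ' = b := by
      have := hget 1; simpa [hd] using this
    have hgc : PySem.List.pyGetD cs ((s : Int) + 1 + 1) ' ' = c := by
      have := hget 2; rw [show ((s : Int) + 1 + 1) = (s : Int) + (2 : Nat) by push_cast; ring]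
      simpa [hd] using this
    -- unfold three iterations of A's loop
    rw [PySem.List.pyRange_one_cons (by omega : (s : Int) < (cs.length : Int)),
        PySem.List.pyRange_one_cons (by omega : (s : Int) + 1 < (cs.length : Int)),
        PySem.List.pyRange_one_cons (by omega : (s : Int) + 1 + 1 < (cs.length : Int))]
    simp only [List.foldl_cons, stepA_c0, stepA_c1, stepA_c2, hga, hgb, hgc]
    have hcond : ((s : Int) + 1 + 1 ≠ (cs.length : Int) - 1) := by omega
    have hstep : ((s : Int) + 1 + 1 + 1) = ((s + 3 : Nat) : Int) := by push_cast; ring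
    rw [hstep]
    -- unfold one iteration of B's loop
    rw [altGo]
    rw [dif_pos h3]
    have hchunk : (cs.drop s).take 3 = [a, b, c] := by rw [hd]; rfl
    have hdrop3 : cs.drop (s + 3) = rest := by
      rw [← List.drop_drop, hd]; rfl
    simp only [hchunk]
    have hget2 : ([a, b, c] : List Char).getD 2 ' ' = c := rfl
    rw [hget2]
    have hacc : acc ++ [a] ++ [b] ++ [c] = acc ++ [a, b, c] := by simp
    by_cases hv : c ∈ "aeiou".toList
    · rw [if_neg (fun hcon => hcon.1 hv), if_pos hv, hacc]
      exact ih (cs.length - (s + 3)) (by omega) (s + 3) rfl (by omega) _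
    · rw [if_pos ⟨hv, hcond⟩, if_neg hv, hacc]
      exact ih (cs.length - (s + 3)) (by omega) (s + 3) rfl (by omega) _
  · -- final (possibly empty or short) chunk: no separator
    rw [altGo, dif_neg h3]
    have hlen : (cs.drop s).length ≤ 3 := by omega
    match hdd : cs.drop s with
    | [] =>
      have : cs.length = s := by rw [hdd] at hdropLen; simp at hdropLen; omega
      rw [PySem.List.pyRange_one_eq_nil (by omega)]
      simp
    | [a] =>
      have hL : cs.length = s + 1 := by rw [hdd] at hdropLen; simp at hdropLen; omega
      have hga : PySem.List.pyGetD cs (s : Int) ' ' = a := by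
        have := hget 0; simpa [hdd] using this
      rw [hL, show (((s + 1 : Nat)) : Int) = (s : Int) + 1 by push_cast; ring,
          PySem.List.pyRange_one_cons (by omega),
          PySem.List.pyRange_one_eq_nil (by omega)]
      simp [stepA_c0, hga]
    | [a, b] =>
      have hL : cs.length = s + 2 := by rw [hdd] at hdropLen; simp at hdropLen; omega
      have hga : PySem.List.pyGetD cs (s : Int) ' ' = a := by
        have := hget 0; simpa [hdd] using this
      have hgb : PySem.List.pyGetD cs ((s : Int) + 1) ' ' = b := by
        have := hget 1; simpa [hdd] using this
      rw [hL, show (((s + 2 : Nat)) : Int) = (s : Int) + 2 by push_cast; ring,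
          PySem.List.pyRange_one_cons (by omega),
          PySem.List.pyRange_one_cons (by omega),
          PySem.List.pyRange_one_eq_nil (by omega)]
      simp [stepA_c0, stepA_c1, hga, hgb]
    | [a, b, c] =>
      have hL : cs.length = s + 3 := by rw [hdd] at hdropLen; simp at hdropLen; omega
      have hga : PySem.List.pyGetD cs (s : Int) ' ' = a := by
        have := hget 0; simpa [hdd] using this
      have hgb : PySem.List.pyGetD cs ((s : Int) + 1) ' ' = b := by
        have := hget 1; simpa [hdd] using this
      have hgc : PySem.List.pyGetD cs ((s : Int) + 1 + 1) ' ' = c := by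
        have := hget 2
        rw [show ((s : Int) + 1 + 1) = (s : Int) + (2 : Nat) by push_cast; ring]
        simpa [hdd] using this
      rw [hL, show (((s + 3 : Nat)) : Int) = (s : Int) + 3 by push_cast; ring,
          PySem.List.pyRange_one_cons (by omega),
          PySem.List.pyRange_one_cons (by omega),
          PySem.List.pyRange_one_cons (by omega),
          PySem.List.pyRange_one_eq_nil (by omega)]
      simp only [List.foldl_cons, List.foldl_nil, stepA_c0, stepA_c1, stepA_c2, hga, hgb, hgc]
      rw [if_neg (by rw [hL]; push_cast; omega : ¬ (¬ c ∈ "aeiou".toList ∧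
        (s : Int) + 1 + 1 ≠ (cs.length : Int) - 1))]
      simp
    | a :: b :: c :: d :: rest =>
      rw [hdd] at hdropLen; simp at hdropLen; omega

-- ===== VERDICT (by name: the statement is the Claim_ definition above) =====
theorem add_underscores_spec : Claim_equal_add_underscores := by
  intro txt _
  unfold Spec_add_underscores add_underscores add_underscores_alt
  have := foldA_eq txt.toList txt.toList.length 0 (by omega) (by omega) []
  simp only [Nat.cast_zero] at this
  simp only [this]
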